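-- pv_equiv track=rewrite | github.com/DanielWarg/AliceV2 | services/loadgen/burners/cpu_spin.py | _cpu_burn_cycle
-- ===== SOURCE A (Python) =====
-- def _cpu_burn_cycle(iterations: int = 10_000_000) -> int:
--     """Single CPU burn cycle - compute-intensive work"""
--     accumulator = 0
--     for i in range(iterations):
--         # Mix of operations to stress different CPU units
--         accumulator += i * i
--         accumulator = accumulator % 1000000  # Prevent overflow
--         if i % 100000 == 0:
--             accumulator ^= i  # XOR operation
--     return accumulator
-- ===== SOURCE B (Python) =====
-- def _sq(n):
--     """Sum of squares 0^2 + 1^2 + ... + n^2 (closed form)."""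
--     return n * (n + 1) * (2 * n + 1) // 6
--
--
-- def _cpu_burn_cycle(iterations: int = 10_000_000) -> int:
--     """Single CPU burn cycle - same result via one closed-form step per 100000-block"""
--     acc = 0
--     for s in range(0, iterations, 100000):
--         acc = ((acc + s * s) % 1000000) ^ s
--         e = min(s + 100000, iterations)
--         if s + 1 < e:
--             acc = (acc + _sq(e - 1) - _sq(s)) % 1000000
--     return acc
-- ===== Notes on version B (the rewrite author's own statement) =====
-- stated objective: faster
-- what changed: Replace the per-iteration loop by one closed-form sum-of-squares step (n(n+1)(2n+1)/6) per 100000-wide block between XOR events, modding once per block.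
import Mathlib
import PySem

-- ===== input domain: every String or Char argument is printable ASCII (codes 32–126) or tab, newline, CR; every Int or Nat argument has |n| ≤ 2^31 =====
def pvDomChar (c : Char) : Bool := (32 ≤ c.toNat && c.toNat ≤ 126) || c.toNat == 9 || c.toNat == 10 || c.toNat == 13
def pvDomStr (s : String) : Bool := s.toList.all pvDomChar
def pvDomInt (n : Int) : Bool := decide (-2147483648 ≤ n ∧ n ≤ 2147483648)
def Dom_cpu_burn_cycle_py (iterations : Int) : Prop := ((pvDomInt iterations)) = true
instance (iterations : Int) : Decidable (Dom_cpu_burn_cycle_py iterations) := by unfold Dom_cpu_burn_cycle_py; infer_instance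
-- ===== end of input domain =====

-- B replaces A's per-iteration loop by one closed-form sum-of-squares step per
-- 100000-wide block between XOR events (asymptotically faster; measured by the check).

-- ===== PORT A =====
-- loop body of A: accumulator += i*i; accumulator %= 1000000; if i % 100000 == 0: accumulator ^= i
def pvStepA (accumulator i : Int) : Int :=
  let accumulator := accumulator + i * i
  let accumulator := PySem.Int.mod accumulator 1000000
  if PySem.Int.mod i 100000 = 0 then PySem.Int.bxor accumulator i else accumulator

def cpu_burn_cycle_py (iterations : Int) : Int :=
  (PySem.List.pyRange 0 iterations 1).foldl pvStepA 0

-- ===== PORT B =====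
-- _sq n = n*(n+1)*(2*n+1) // 6, the closed-form sum of squares 0..n
def pvSq (n : Int) : Int := PySem.Int.floordiv (n * (n + 1) * (2 * n + 1)) 6

-- loop body of B: one XOR step at block start s, then the whole interior of the block in closed form
def pvStepB (iterations acc s : Int) : Int :=
  let acc := PySem.Int.bxor (PySem.Int.mod (acc + s * s) 1000000) s
  let e := min (s + 100000) iterations
  if s + 1 < e then PySem.Int.mod (acc + pvSq (e - 1) - pvSq s) 1000000 else acc

def cpu_burn_cycle_py_alt (iterations : Int) : Int :=
  (PySem.List.pyRange 0 iterations 100000).foldl (pvStepB iterations) 0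

-- ===== PRECONDITION & SPEC =====
def Spec_cpu_burn_cycle_py (iterations : Int) (out : Int) : Prop := out = cpu_burn_cycle_py_alt iterations
instance (iterations : Int) (out : Int) : Decidable (Spec_cpu_burn_cycle_py iterations out) := by unfold Spec_cpu_burn_cycle_py; infer_instance

-- ===== CLAIM (what is proved, stated in full; the proofs are below) =====
def Claim_equal_cpu_burn_cycle_py : Prop := ∀ (iterations : Int), Dom_cpu_burn_cycle_py iterations → Spec_cpu_burn_cycle_py iterations (cpu_burn_cycle_py iterations)

-- ===== LEMMAS AND PROOFS =====

theorem pvModE (a : Int) : PySem.Int.mod a 1000000 = a % 1000000 :=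
  PySem.Int.mod_eq_emod_of_pos (by norm_num)

theorem pvModE2 (a : Int) : PySem.Int.mod a 100000 = a % 100000 :=
  PySem.Int.mod_eq_emod_of_pos (by norm_num)

theorem pvStepA_eq (acc i : Int) : pvStepA acc i =
    if i % 100000 = 0 then PySem.Int.bxor ((acc + i * i) % 1000000) i
    else (acc + i * i) % 1000000 := by
  simp only [pvStepA]
  rw [pvModE, pvModE2]

-- sum-of-squares recurrence; holds for every Int n since floordiv drops an exact multiple of 6
theorem pvSq_succ (n : Int) : pvSq n = pvSq (n - 1) + n * n := by
  unfold pvSq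
  rw [PySem.Int.floordiv_eq_ediv_of_pos (by norm_num),
      PySem.Int.floordiv_eq_ediv_of_pos (by norm_num),
      show n * (n + 1) * (2 * n + 1) = (n - 1) * (n - 1 + 1) * (2 * (n - 1) + 1) + n * n * 6 by ring,
      Int.add_mul_ediv_right _ _ (by norm_num)]

-- a stretch of A's loop containing no XOR index collapses to one closed-form step
theorem pvInner (b : Int) : ∀ (n : Nat) (a acc : Int), b - a = n → a < b →
    (∀ i : Int, a ≤ i → i < b → i % 100000 ≠ 0) →
    (PySem.List.pyRange a b 1).foldl pvStepA acc
      = (acc + pvSq (b - 1) - pvSq (a - 1)) % 1000000 := by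
  intro n
  induction n with
  | zero => intro a acc hn hab _; omega
  | succ m ih =>
    intro a acc hn hab hno
    rw [PySem.List.pyRange_one_cons hab, List.foldl_cons, pvStepA_eq,
        if_neg (hno a le_rfl hab)]
    by_cases h1 : a + 1 < b
    · rw [ih (a + 1) _ (by omega) h1 (fun i hi1 hi2 => hno i (by omega) hi2)]
      have hsq : pvSq (a + 1 - 1) = pvSq (a - 1) + a * a := by
        simpa using pvSq_succ a
      rw [hsq]
      have : (acc + a * a) % 1000000 + pvSq (b - 1) - (pvSq (a - 1) + a * a)
          = (acc + a * a) % 1000000 + (pvSq (b - 1) - pvSq (a - 1) - a * a) := by ring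
      rw [this]
      have h2 : ∀ x y : Int, (x % 1000000 + y) % 1000000 = (x + y) % 1000000 := by
        intro x y; omega
      rw [h2]
      ring_nf
    · have hb : b = a + 1 := by omega
      subst hb
      rw [PySem.List.pyRange_one_eq_nil (by omega), List.foldl_nil]
      rw [show (a : Int) + 1 - 1 = a by ring, pvSq_succ a]
      ring_nf

-- cons/nil shape of range(s, b, 100000)
theorem pvRangeBig_nil (s b : Int) (h : b ≤ s) : PySem.List.pyRange s b 100000 = [] := by
  rw [PySem.List.pyRange_of_pos _ _ (by norm_num)]
  simp [show ¬ s < b by omega]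

theorem pvRangeBig_cons (s b : Int) (h : s < b) :
    PySem.List.pyRange s b 100000 = s :: PySem.List.pyRange (s + 100000) b 100000 := by
  rw [PySem.List.pyRange_of_pos _ _ (by norm_num),
      PySem.List.pyRange_of_pos _ _ (by norm_num)]
  by_cases h2 : s + 100000 < b
  · have hcount : (if s < b then ((b - s + 100000 - 1) / 100000).toNat else 0)
        = (if s + 100000 < b then ((b - (s + 100000) + 100000 - 1) / 100000).toNat else 0) + 1 := by
      simp only [if_pos h, if_pos h2]
      omega
    rw [hcount, List.range_succ_eq_map, List.map_cons, List.map_map]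
    refine congr_arg₂ List.cons (by norm_num) (List.map_congr_left ?_)
    intro k _
    simp only [Function.comp_apply]
    push_cast
    ring
  · have hcount : (if s < b then ((b - s + 100000 - 1) / 100000).toNat else 0) = 1 := by
      simp only [if_pos h]
      omega
    rw [hcount]
    simp [show ¬ s + 100000 < b by omega]

-- main block decomposition: A's fold from a block start equals B's fold over block starts
theorem pvBlocks (iterations : Int) : ∀ (n : Nat) (s acc : Int),
    iterations - s ≤ (n : Int) * 100000 → s % 100000 = 0 →
    (PySem.List.pyRange s iterations 1).foldl pvStepA acc
      = (PySem.List.pyRange s iterations 100000).foldl (pvStepB iterations) acc := by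
  intro n
  induction n with
  | zero =>
    intro s acc hn _
    rw [PySem.List.pyRange_one_eq_nil (by omega), pvRangeBig_nil _ _ (by omega)]
    rfl
  | succ m ih =>
    intro s acc hn hs
    by_cases hlt : s < iterations
    · set e := min (s + 100000) iterations with he
      have h1 : s ≤ e := by omega
      have h2 : e ≤ iterations := by omega
      have hse : s < e := by omega
      rw [PySem.List.pyRange_one_append s e iterations h1 h2, List.foldl_append,
          PySem.List.pyRange_one_cons hse, List.foldl_cons,
          pvRangeBig_cons s iterations hlt, List.foldl_cons,
          pvStepA_eq, if_pos hs]
      set a1 := PySem.Int.bxor ((acc + s * s) % 1000000) s with ha1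
      have hB0 : pvStepB iterations acc s =
          if s + 1 < e then PySem.Int.mod (a1 + pvSq (e - 1) - pvSq s) 1000000 else a1 := by
        unfold pvStepB
        rw [pvModE]
      have htail : PySem.List.pyRange e iterations 1
          = PySem.List.pyRange (s + 100000) iterations 1 := by
        by_cases hc : s + 100000 ≤ iterations
        · rw [show e = s + 100000 by omega]
        · rw [show e = iterations by omega,
              PySem.List.pyRange_one_eq_nil (le_refl iterations),
              PySem.List.pyRange_one_eq_nil (by omega)]
      have hihs : iterations - (s + 100000) ≤ (m : Int) * 100000 := by
        push_cast at hn ⊢; omega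
      have hihm : (s + 100000) % 100000 = 0 := by omega
      by_cases hint : s + 1 < e
      · rw [pvInner e (e - (s + 1)).toNat (s + 1) a1 (by omega) hint
              (fun i hi1 hi2 => by omega),
            show s + 1 - 1 = s by ring,
            hB0, if_pos hint, pvModE, htail]
        exact ih (s + 100000) _ hihs hihm
      · have hee : e = s + 1 := by omega
        rw [hee, PySem.List.pyRange_one_eq_nil (le_refl (s + 1)), List.foldl_nil,
            hB0, if_neg hint, hee.symm, htail]
        exact ih (s + 100000) _ hihs hihm
    · rw [PySem.List.pyRange_one_eq_nil (by omega), pvRangeBig_nil _ _ (by omega)]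
      rfl

-- ===== VERDICT (by name: the statement is the Claim_ definition above) =====
theorem cpu_burn_cycle_py_spec : Claim_equal_cpu_burn_cycle_py := by
  intro iterations _
  unfold Spec_cpu_burn_cycle_py cpu_burn_cycle_py cpu_burn_cycle_py_alt
  exact pvBlocks iterations (max iterations 0).toNat 0 0 (by omega) (by norm_num)
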